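-- pv_equiv track=rewrite | github.com/cspost/dnatabase | code/generate_typos.py | edits
-- ===== SOURCE A (Python) =====
-- ALPHABET = 'ABCDEFGHIJKLMNOPQRSTUVWXYZ'
--
-- def get_typo_keys(key_coords, keymap, letter):
--     """Returns all of the keys which are adjacent or diagnol to the given key
--     on a QWERTY keyboard"""
--     letter = letter.upper()
--     if letter not in key_coords:
--         return list()
--     (x, y) = key_coords[letter]
--     typos = list()
--     for i in range(x-1, x+2):
--         if i < 0 or i >= len(keymap): continue
--         for j in range(y-1, y+2):
--             if j < 0 or j >= len(keymap[i]): continue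
--             new_letter = keymap[i][j]
--             if new_letter == ' ': continue
--             typos.append(new_letter)
--     return typos
--
-- def edits(key_coords, keymap, word):
--     """Generates all of the spelling deletions, transposes, replaces, and
--     insertions for the provided word. Based on the Norvig spelling corrector
--     found here http://norvig.com/spell-correct.html. It has been modified to
--     include only letters close on the keyboard for replaces/inserts."""
--     typos = list()
--     for i in range(0, len(word)):
--         if (i < len(word)): #deletions
--             typos.append(word[:i] + word[i+1:])
--         if (i+1 < len(word)): #tranpositions
--             typos.append(word[:i] + word[i+1] + word[i] + word[i+2:])
--         for char in get_typo_keys(key_coords, keymap, word[i]):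
--             if (i < len(word) and word[i] != char): #replacements
--                 typos.append(word[:i] + char + word[i+1:])
--             if (char in ALPHABET): #insertions
--                 typos.append(word[:i] + char + word[i:]) #insertions
--     return set(typos)
-- ===== SOURCE B (Python) =====
-- ALPHABET = 'ABCDEFGHIJKLMNOPQRSTUVWXYZ'
--
-- def _neighbours(key_coords, keymap, letter):
--     """Adjacent/diagonal keyboard keys of letter (one clamped comprehension)."""
--     u = letter.upper()
--     if u not in key_coords:
--         return []
--     x, y = key_coords[u]
--     return [keymap[i][j]
--             for i in (x - 1, x, x + 1) if 0 <= i < len(keymap)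
--             for j in (y - 1, y, y + 1) if 0 <= j < len(keymap[i])
--             if keymap[i][j] != ' ']
--
-- def edits(key_coords, keymap, word):
--     """Zipper traversal: walk a (prefix, suffix) pair over the word, peeling
--     one character per step -- no position indices, no len(), and no slicing
--     of the whole word.  Each step emits the variants touching the peeled
--     character as one comprehension block."""
--     out = []
--     left, right = '', word
--     while right:
--         c, rest = right[0], right[1:]
--         out += ([left + rest]                                          # delete c
--                 + ([left + rest[0] + c + rest[1:]] if rest else [])    # transpose
--                 + [v for ch in _neighbours(key_coords, keymap, c)
--                      for v in ([left + ch + rest] if ch != c else [])          # replace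
--                             + ([left + ch + right] if ch in ALPHABET else [])])  # insert
--         left, right = left + c, rest
--     return set(out)
-- ===== Notes on version B (the rewrite author's own statement) =====
-- stated objective: alternative
-- what changed: B replaces A's index loop (range(len(word)) with four word[:i]/word[i+1:] slice expressions and i-based guards) by a zipper traversal: a (prefix, suffix) state pair walks the word peeling one character per step, each step's deletion/transposition/replace/insert variants are emitted as one comprehension block built by prepending to the suffix, and keyboard neighbours come from a single bounds-clamped comprehension instead of range loops with continue.
import Mathlib
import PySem

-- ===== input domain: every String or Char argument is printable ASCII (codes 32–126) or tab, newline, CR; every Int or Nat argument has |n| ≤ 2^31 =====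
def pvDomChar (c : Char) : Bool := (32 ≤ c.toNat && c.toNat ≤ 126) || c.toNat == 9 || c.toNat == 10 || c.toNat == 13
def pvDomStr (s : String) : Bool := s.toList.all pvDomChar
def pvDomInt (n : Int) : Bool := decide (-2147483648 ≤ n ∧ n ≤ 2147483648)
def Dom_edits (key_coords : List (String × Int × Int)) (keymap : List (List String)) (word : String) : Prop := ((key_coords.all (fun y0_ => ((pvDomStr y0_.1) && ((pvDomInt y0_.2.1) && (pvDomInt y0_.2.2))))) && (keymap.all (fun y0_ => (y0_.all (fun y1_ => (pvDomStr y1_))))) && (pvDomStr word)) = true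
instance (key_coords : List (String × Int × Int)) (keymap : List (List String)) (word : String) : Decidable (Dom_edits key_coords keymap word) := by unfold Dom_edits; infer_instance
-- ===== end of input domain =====

-- B replaces A's indexed loop with whole-word slicing by a zipper traversal: a (prefix, suffix)
-- pair walks the word, peeling one character per step and emitting that step's variants; objective: alternative.

-- ===== PORT A =====
def editsAlphabet : String := "ABCDEFGHIJKLMNOPQRSTUVWXYZ"

def getTypoKeys (key_coords : List (String × Int × Int)) (keymap : List (List String)) (letter0 : String) : List String :=
  let letter := PySem.Str.upper letter0
  if PySem.Dict.contains ⟨key_coords⟩ letter = false then []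
  else
    let xy := PySem.Dict.getD ⟨key_coords⟩ letter (0, 0)
    (PySem.List.pyRange (xy.1 - 1) (xy.1 + 2)).foldl (fun typos i =>
      if i < 0 ∨ PySem.List.len keymap ≤ i then typos
      else
        (PySem.List.pyRange (xy.2 - 1) (xy.2 + 2)).foldl (fun typos j =>
          if j < 0 ∨ PySem.List.len (PySem.List.pyGetD keymap i []) ≤ j then typos
          else
            let new_letter := PySem.List.pyGetD (PySem.List.pyGetD keymap i []) j ""
            if new_letter = " " then typos else typos ++ [new_letter]) typos) []

def edits (key_coords : List (String × Int × Int)) (keymap : List (List String)) (word : String) : List String :=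
  let cs := word.toList
  let n := PySem.Str.len word
  let typos := (PySem.List.pyRange 0 n).foldl (fun typos i =>
    let typos := if i < n then
        typos ++ [String.ofList (PySem.List.slice cs none (some i) ++ PySem.List.slice cs (some (i + 1)) none)]
      else typos
    let typos := if i + 1 < n then
        typos ++ [String.ofList (PySem.List.slice cs none (some i) ++
          [PySem.List.pyGetD cs (i + 1) ' ', PySem.List.pyGetD cs i ' '] ++
          PySem.List.slice cs (some (i + 2)) none)]
      else typos
    (getTypoKeys key_coords keymap (String.ofList [PySem.List.pyGetD cs i ' '])).foldl (fun typos char =>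
      let typos := if i < n ∧ String.ofList [PySem.List.pyGetD cs i ' '] ≠ char then
          typos ++ [String.ofList (PySem.List.slice cs none (some i) ++ char.toList ++
            PySem.List.slice cs (some (i + 1)) none)]
        else typos
      if PySem.Str.isIn char editsAlphabet then
        typos ++ [String.ofList (PySem.List.slice cs none (some i) ++ char.toList ++
          PySem.List.slice cs (some i) none)]
      else typos) typos) []
  PySem.Set.ofList typos

-- ===== PORT B =====
def editsNeighbours (key_coords : List (String × Int × Int)) (keymap : List (List String)) (letter : String) : List String :=
  let u := PySem.Str.upper letter
  if PySem.Dict.contains ⟨key_coords⟩ u then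
    let xy := PySem.Dict.getD ⟨key_coords⟩ u (0, 0)
    ([xy.1 - 1, xy.1, xy.1 + 1].filter (fun i => decide (0 ≤ i) && decide (i < PySem.List.len keymap))).flatMap (fun i =>
      let row := PySem.List.pyGetD keymap i []
      (([xy.2 - 1, xy.2, xy.2 + 1].filter (fun j => decide (0 ≤ j) && decide (j < PySem.List.len row))).map
        (fun j => PySem.List.pyGetD row j "")).filter (fun nl => nl ≠ " "))
  else []

-- the comprehension block one zipper step emits (deletion, transposition, replaces/inserts)
def editsStep (key_coords : List (String × Int × Int)) (keymap : List (List String))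
    (L : List Char) (c : Char) (rest : List Char) : List String :=
  [String.ofList (L ++ rest)]
  ++ (match rest with
      | [] => []
      | r0 :: rs => [String.ofList (L ++ r0 :: c :: rs)])
  ++ (editsNeighbours key_coords keymap (String.ofList [c])).flatMap (fun ch =>
      (if ch ≠ String.ofList [c] then [String.ofList (L ++ ch.toList ++ rest)] else [])
      ++ (if PySem.Str.isIn ch editsAlphabet then [String.ofList (L ++ ch.toList ++ c :: rest)] else []))

-- zipper loop: peel one character per step from the suffix onto the prefix, emitting that step's block
def editsLoop (key_coords : List (String × Int × Int)) (keymap : List (List String)) :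
    List Char → List Char → List String → List String
  | _, [], out => out
  | L, c :: rest, out =>
      editsLoop key_coords keymap (L ++ [c]) rest (out ++ editsStep key_coords keymap L c rest)

def edits_alt (key_coords : List (String × Int × Int)) (keymap : List (List String)) (word : String) : List String :=
  PySem.Set.ofList (editsLoop key_coords keymap [] word.toList [])

-- ===== PRECONDITION & SPEC =====
def Spec_edits (key_coords : List (String × Int × Int)) (keymap : List (List String)) (word : String) (out : List String) : Prop := out = edits_alt key_coords keymap word
instance (key_coords : List (String × Int × Int)) (keymap : List (List String)) (word : String) (out : List String) : Decidable (Spec_edits key_coords keymap word out) := by unfold Spec_edits; infer_instance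

-- ===== CLAIM (what is proved, stated in full; the proofs are below) =====
def Claim_equal_edits : Prop := ∀ (key_coords : List (String × Int × Int)) (keymap : List (List String)) (word : String), Dom_edits key_coords keymap word → Spec_edits key_coords keymap word (edits key_coords keymap word)

-- ===== LEMMAS AND PROOFS =====

-- range(a-1, a+2) is the three-element list [a-1, a, a+1]
theorem pvRangeThree (a : Int) : PySem.List.pyRange (a - 1) (a + 2) = [a - 1, a, a + 1] := by
  rw [PySem.List.pyRange_one_cons (by omega), PySem.List.pyRange_one_cons (by omega)]
  have h2 : a + 2 = (a + 1) + 1 := by ring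
  rw [show a - 1 + 1 = a by ring, h2, PySem.List.pyRange_one_singleton]

-- A's guarded inner append loop, as filter/map/filter
theorem pvInnerEq (row : List String) (l : List Int) (acc : List String) :
    l.foldl (fun typos j =>
      if j < 0 ∨ PySem.List.len row ≤ j then typos
      else
        let new_letter := PySem.List.pyGetD row j ""
        if new_letter = " " then typos else typos ++ [new_letter]) acc
    = acc ++ ((l.filter (fun j => decide (0 ≤ j) && decide (j < PySem.List.len row))).map
        (fun j => PySem.List.pyGetD row j "")).filter (fun nl => nl ≠ " ") := by
  induction l generalizing acc with
  | nil => simp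
  | cons j l ih =>
    simp only [List.foldl_cons, List.filter_cons]
    by_cases hb : j < 0 ∨ PySem.List.len row ≤ j
    · rw [if_pos hb]
      have hf : (decide (0 ≤ j) && decide (j < PySem.List.len row)) = false := by
        simp only [Bool.and_eq_false_iff, decide_eq_false_iff_not]; omega
      rw [hf, ih]
      simp
    · rw [if_neg hb]
      have ht : (decide (0 ≤ j) && decide (j < PySem.List.len row)) = true := by
        simp only [Bool.and_eq_true, decide_eq_true_eq]; omega
      rw [ht]
      by_cases hsp : PySem.List.pyGetD row j "" = " "
      · simp only [hsp, ih]
        simp [hsp]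
      · simp only [if_neg hsp, ih]
        simp [hsp, List.append_assoc]

-- A's guarded outer loop, as filter/flatMap of the inner results
theorem pvOuterEq (keymap : List (List String)) (y : Int) (l : List Int) (acc : List String) :
    l.foldl (fun typos i =>
      if i < 0 ∨ PySem.List.len keymap ≤ i then typos
      else
        ([y - 1, y, y + 1] : List Int).foldl (fun typos j =>
          if j < 0 ∨ PySem.List.len (PySem.List.pyGetD keymap i []) ≤ j then typos
          else
            let new_letter := PySem.List.pyGetD (PySem.List.pyGetD keymap i []) j ""
            if new_letter = " " then typos else typos ++ [new_letter]) typos) acc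
    = acc ++ (l.filter (fun i => decide (0 ≤ i) && decide (i < PySem.List.len keymap))).flatMap (fun i =>
        let row := PySem.List.pyGetD keymap i []
        (([y - 1, y, y + 1].filter (fun j => decide (0 ≤ j) && decide (j < PySem.List.len row))).map
          (fun j => PySem.List.pyGetD row j "")).filter (fun nl => nl ≠ " ")) := by
  induction l generalizing acc with
  | nil => simp
  | cons i l ih =>
    rw [List.foldl_cons, List.filter_cons]
    by_cases hb : i < 0 ∨ PySem.List.len keymap ≤ i
    · rw [if_pos hb]
      have hf : (decide (0 ≤ i) && decide (i < PySem.List.len keymap)) = false := by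
        simp only [Bool.and_eq_false_iff, decide_eq_false_iff_not]; omega
      rw [hf, ih]
      simp
    · rw [if_neg hb]
      have ht : (decide (0 ≤ i) && decide (i < PySem.List.len keymap)) = true := by
        simp only [Bool.and_eq_true, decide_eq_true_eq]; omega
      rw [ht, pvInnerEq, ih]
      simp [List.append_assoc]

-- the two neighbour computations agree
theorem pvTypoKeysEq (key_coords : List (String × Int × Int)) (keymap : List (List String)) (letter : String) :
    getTypoKeys key_coords keymap letter = editsNeighbours key_coords keymap letter := by
  unfold getTypoKeys editsNeighbours
  by_cases hc : PySem.Dict.contains (⟨key_coords⟩ : PySem.Dict String (Int × Int)) (PySem.Str.upper letter) = true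
  · simp only [hc, Bool.true_eq_false, reduceIte, if_true]
    rw [pvRangeThree, pvRangeThree, pvOuterEq]
    simp
  · simp only [Bool.not_eq_true] at hc
    simp [hc]

-- per-position segment of A's output, in A's own syntax
def pvBlockA (key_coords : List (String × Int × Int)) (keymap : List (List String)) (cs : List Char) (n i : Int) : List String :=
  (if i < n then
      [String.ofList (PySem.List.slice cs none (some i) ++ PySem.List.slice cs (some (i + 1)) none)]
    else [])
  ++ (if i + 1 < n then
      [String.ofList (PySem.List.slice cs none (some i) ++
        [PySem.List.pyGetD cs (i + 1) ' ', PySem.List.pyGetD cs i ' '] ++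
        PySem.List.slice cs (some (i + 2)) none)]
    else [])
  ++ (getTypoKeys key_coords keymap (String.ofList [PySem.List.pyGetD cs i ' '])).flatMap (fun char =>
      (if i < n ∧ String.ofList [PySem.List.pyGetD cs i ' '] ≠ char then
          [String.ofList (PySem.List.slice cs none (some i) ++ char.toList ++
            PySem.List.slice cs (some (i + 1)) none)]
        else [])
      ++ (if PySem.Str.isIn char editsAlphabet then
          [String.ofList (PySem.List.slice cs none (some i) ++ char.toList ++
            PySem.List.slice cs (some i) none)]
        else []))

-- A's inner char loop as a flatMap
theorem pvCharFoldEq (cs : List Char) (n i : Int) (chars : List String) (acc : List String) :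
    chars.foldl (fun typos char =>
      let typos := if i < n ∧ String.ofList [PySem.List.pyGetD cs i ' '] ≠ char then
          typos ++ [String.ofList (PySem.List.slice cs none (some i) ++ char.toList ++
            PySem.List.slice cs (some (i + 1)) none)]
        else typos
      if PySem.Str.isIn char editsAlphabet then
        typos ++ [String.ofList (PySem.List.slice cs none (some i) ++ char.toList ++
          PySem.List.slice cs (some i) none)]
      else typos) acc
    = acc ++ chars.flatMap (fun char =>
      (if i < n ∧ String.ofList [PySem.List.pyGetD cs i ' '] ≠ char then
          [String.ofList (PySem.List.slice cs none (some i) ++ char.toList ++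
            PySem.List.slice cs (some (i + 1)) none)]
        else [])
      ++ (if PySem.Str.isIn char editsAlphabet then
          [String.ofList (PySem.List.slice cs none (some i) ++ char.toList ++
            PySem.List.slice cs (some i) none)]
        else [])) := by
  induction chars generalizing acc with
  | nil => simp
  | cons c chars ih =>
    rw [List.foldl_cons, List.flatMap_cons, ih]
    split_ifs <;> simp [List.append_assoc]

-- A's whole loop as a flatMap of blocks
theorem pvAOuter (key_coords : List (String × Int × Int)) (keymap : List (List String))
    (cs : List Char) (n : Int) (l : List Int) (acc : List String) :
    l.foldl (fun typos i =>
      let typos := if i < n then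
          typos ++ [String.ofList (PySem.List.slice cs none (some i) ++ PySem.List.slice cs (some (i + 1)) none)]
        else typos
      let typos := if i + 1 < n then
          typos ++ [String.ofList (PySem.List.slice cs none (some i) ++
            [PySem.List.pyGetD cs (i + 1) ' ', PySem.List.pyGetD cs i ' '] ++
            PySem.List.slice cs (some (i + 2)) none)]
        else typos
      (getTypoKeys key_coords keymap (String.ofList [PySem.List.pyGetD cs i ' '])).foldl (fun typos char =>
        let typos := if i < n ∧ String.ofList [PySem.List.pyGetD cs i ' '] ≠ char then
            typos ++ [String.ofList (PySem.List.slice cs none (some i) ++ char.toList ++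
              PySem.List.slice cs (some (i + 1)) none)]
          else typos
        if PySem.Str.isIn char editsAlphabet then
          typos ++ [String.ofList (PySem.List.slice cs none (some i) ++ char.toList ++
            PySem.List.slice cs (some i) none)]
        else typos) typos) acc
    = acc ++ l.flatMap (pvBlockA key_coords keymap cs n) := by
  induction l generalizing acc with
  | nil => simp
  | cons i l ih =>
    rw [List.foldl_cons, List.flatMap_cons]
    simp only []
    rw [pvCharFoldEq cs n i, ih]
    simp only [pvBlockA]
    split_ifs <;> simp [List.append_assoc]

theorem pvAEq (key_coords : List (String × Int × Int)) (keymap : List (List String)) (word : String) :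
    edits key_coords keymap word
    = PySem.Set.ofList ((PySem.List.pyRange 0 (PySem.Str.len word)).flatMap
        (pvBlockA key_coords keymap word.toList (PySem.Str.len word))) := by
  simp only [edits]
  rw [pvAOuter]
  rw [List.nil_append]
-- A's block at split point L ++ c :: rest is B's per-step block
theorem pvBlockSplit (key_coords : List (String × Int × Int)) (keymap : List (List String))
    (L : List Char) (c : Char) (rest : List Char) :
    pvBlockA key_coords keymap (L ++ c :: rest) (((L ++ c :: rest).length : Int)) ((L.length : Int))
    = [String.ofList (L ++ rest)]
      ++ (match rest with
          | [] => []
          | r0 :: rs => [String.ofList (L ++ r0 :: c :: rs)])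
      ++ (getTypoKeys key_coords keymap (String.ofList [c])).flatMap (fun ch =>
          (if ch ≠ String.ofList [c] then [String.ofList (L ++ ch.toList ++ rest)] else [])
          ++ (if PySem.Str.isIn ch editsAlphabet then [String.ofList (L ++ ch.toList ++ c :: rest)] else [])) := by
  have hsplit : L ++ c :: rest = (L ++ [c]) ++ rest := by simp
  have sTo : PySem.List.slice (L ++ c :: rest) none (some (L.length : Int)) = L := by
    rw [PySem.List.slice_to_natCast]
    simp
  have sFrom1 : PySem.List.slice (L ++ c :: rest) (some ((L.length : Int) + 1)) none = rest := by
    rw [show ((L.length : Int) + 1) = ((L.length + 1 : Nat) : Int) by push_cast; ring,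
      PySem.List.slice_from_natCast, hsplit]
    rw [show L.length + 1 = (L ++ [c]).length by simp, List.drop_left]
  have sFrom0 : PySem.List.slice (L ++ c :: rest) (some (L.length : Int)) none = c :: rest := by
    rw [PySem.List.slice_from_natCast, List.drop_left]
  have sFrom2 : PySem.List.slice (L ++ c :: rest) (some ((L.length : Int) + 2)) none = rest.drop 1 := by
    rw [show ((L.length : Int) + 2) = (((L ++ [c]).length + 1 : Nat) : Int) by simp; ring,
      PySem.List.slice_from_natCast, hsplit]
    rw [← List.drop_drop, List.drop_left]
  have g0 : PySem.List.pyGetD (L ++ c :: rest) (L.length : Int) ' ' = c := by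
    rw [PySem.List.pyGetD_natCast, List.getD_eq_getElem?_getD, List.getElem?_append_right (le_refl _)]
    simp
  have g1 : PySem.List.pyGetD (L ++ c :: rest) ((L.length : Int) + 1) ' ' = rest.getD 0 ' ' := by
    rw [show ((L.length : Int) + 1) = ((L.length + 1 : Nat) : Int) by push_cast; ring,
      PySem.List.pyGetD_natCast, List.getD_eq_getElem?_getD,
      List.getElem?_append_right (by omega : L.length ≤ L.length + 1)]
    simp [List.getD_eq_getElem?_getD]
  have hn : (((L ++ c :: rest).length : Nat) : Int) = (L.length : Int) + (rest.length : Int) + 1 := by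
    simp
    ring
  unfold pvBlockA
  rw [sTo, sFrom1, sFrom0, sFrom2, g0, g1, hn]
  refine congrArg₂ (· ++ ·) (congrArg₂ (· ++ ·) ?_ ?_) ?_
  · rw [if_pos (by omega : (L.length : Int) < (L.length : Int) + (rest.length : Int) + 1)]
  · cases rest with
    | nil =>
      rw [if_neg (show ¬((L.length : Int) + 1 < (L.length : Int) + (([] : List Char).length : Int) + 1) by
        simp)]
    | cons r0 rs =>
      rw [if_pos (show (L.length : Int) + 1 < (L.length : Int) + (((r0 :: rs) : List Char).length : Int) + 1 by
        rw [List.length_cons]; push_cast; omega)]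
      simp
  · refine congrArg₂ List.flatMap ?_ rfl
    funext ch
    refine congrArg₂ (· ++ ·) ?_ ?_
    · have hiff : ((L.length : Int) < (L.length : Int) + (rest.length : Int) + 1 ∧ String.ofList [c] ≠ ch)
          ↔ ch ≠ String.ofList [c] := by
        constructor
        · intro h e; exact h.2 e.symm
        · intro h; exact ⟨by omega, fun e => h e.symm⟩
      rw [if_congr hiff rfl rfl]
    · simp [List.append_assoc]

-- loop invariant: B's zipper emits exactly A's blocks for the remaining positions
theorem pvLoopEq (key_coords : List (String × Int × Int)) (keymap : List (List String))
    (R : List Char) : ∀ (L : List Char) (out : List String),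
    editsLoop key_coords keymap L R out
    = out ++ (List.range R.length).flatMap
        (fun k => pvBlockA key_coords keymap (L ++ R) (((L ++ R).length : Int)) ((L.length + k : Nat) : Int)) := by
  induction R with
  | nil =>
    intro L out
    simp [editsLoop]
  | cons c rest ih =>
    intro L out
    rw [show editsLoop key_coords keymap L (c :: rest) out
        = editsLoop key_coords keymap (L ++ [c]) rest (out ++ editsStep key_coords keymap L c rest) from rfl, ih]
    rw [List.length_cons, List.range_succ_eq_map, List.flatMap_cons, List.flatMap_map]
    rw [List.append_assoc]
    refine congrArg (out ++ ·) ?_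
    refine congrArg₂ (· ++ ·) ?_ ?_
    · rw [show L.length + 0 = L.length from rfl, pvBlockSplit, pvTypoKeysEq]
      rfl
    · rw [show (L ++ [c]) ++ rest = L ++ c :: rest by simp]
      refine List.flatMap_congr ?_
      intro k _
      rw [show (L ++ [c]).length + k = L.length + (k + 1) by simp; omega]

-- ===== VERDICT (by name: the statement is the Claim_ definition above) =====
theorem edits_spec : Claim_equal_edits := by
  intro key_coords keymap word _
  unfold Spec_edits
  rw [pvAEq]
  unfold edits_alt
  rw [pvLoopEq]
  have hn : PySem.Str.len word = ((word.toList.length : Nat) : Int) := by simp [PySem.Str.len_eq]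
  rw [hn, PySem.List.pyRange_zero_natCast, List.flatMap_map]
  simp
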